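-- pv_equiv track=rewrite | github.com/allenai/asta-bench-leaderboard | leaderboard_transformer.py | _pretty_column_name
-- ===== SOURCE A (Python) =====
-- INFORMAL_TO_FORMAL_NAME_MAP = {
--     # Short Names
--     "lit": "Literature Understanding",
--     "code": "Code & Execution",
--     "data": "Data Analysis",
--     "discovery": "End-to-End Discovery",
--
--     # Validation Names
--     "arxivdigestables_validation": "ArxivDIGESTables-Clean",
--     "ArxivDIGESTables_Clean_validation": "ArxivDIGESTables-Clean",
--     "sqa_dev": "ScholarQA-CS2",
--     "ScholarQA_CS2_validation": "ScholarQA-CS2",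
--     "litqa2_validation": "LitQA2-FullText",
--     "LitQA2_FullText_validation": "LitQA2-FullText",
--     "paper_finder_validation": "PaperFindingBench",
--     "PaperFindingBench_validation": "PaperFindingBench",
--     "paper_finder_litqa2_validation": "LitQA2-FullText-Search",
--     "LitQA2_FullText_Search_validation": "LitQA2-FullText-Search",
--     "discoverybench_validation": "DiscoveryBench",
--     "DiscoveryBench_validation": "DiscoveryBench",
--     "core_bench_validation": "CORE-Bench-Hard",
--     "CORE_Bench_Hard_validation": "CORE-Bench-Hard",
--     "ds1000_validation": "DS-1000",
--     "DS_1000_validation": "DS-1000",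
--     "e2e_discovery_validation": "E2E-Bench",
--     "E2E_Bench_validation": "E2E-Bench",
--     "e2e_discovery_hard_validation": "E2E-Bench-Hard",
--     "E2E_Bench_Hard_validation": "E2E-Bench-Hard",
--     "super_validation": "SUPER-Expert",
--     "SUPER_Expert_validation": "SUPER-Expert",
--     # Test Names
--     "paper_finder_test": "PaperFindingBench",
--     "PaperFindingBench_test": "PaperFindingBench",
--     "paper_finder_litqa2_test": "LitQA2-FullText-Search",
--     "LitQA2_FullText_Search_test": "LitQA2-FullText-Search",
--     "sqa_test": "ScholarQA-CS2",
--     "ScholarQA_CS2_test": "ScholarQA-CS2",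
--     "arxivdigestables_test": "ArxivDIGESTables-Clean",
--     "ArxivDIGESTables_Clean_test": "ArxivDIGESTables-Clean",
--     "litqa2_test": "LitQA2-FullText",
--     "LitQA2_FullText_test": "LitQA2-FullText",
--     "discoverybench_test": "DiscoveryBench",
--     "DiscoveryBench_test": "DiscoveryBench",
--     "core_bench_test": "CORE-Bench-Hard",
--     "CORE_Bench_Hard_test": "CORE-Bench-Hard",
--     "ds1000_test": "DS-1000",
--     "DS_1000_test": "DS-1000",
--     "e2e_discovery_test": "E2E-Bench",
--     "E2E_Bench_test": "E2E-Bench",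
--     "e2e_discovery_hard_test": "E2E-Bench-Hard",
--     "E2E_Bench_Hard_test": "E2E-Bench-Hard",
--     "super_test": "SUPER-Expert",
--     "SUPER_Expert_test": "SUPER-Expert",
-- }
--
-- def _pretty_column_name(raw_col: str) -> str:
--     """
--     Takes a raw column name from the DataFrame and returns a "pretty" version.
--     Handles three cases:
--     1. Fixed names (e.g., 'User/organization' -> 'Submitter').
--     2. Dynamic names (e.g., 'ds1000_validation score' -> 'DS1000 Validation Score').
--     3. Fallback for any other names.
--     """
--     # Case 1: Handle fixed, special-case mappings first.
--     fixed_mappings = {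
--         'id': 'id',
--         'Agent': 'Agent',
--         'Agent description': 'Agent Description',
--         'User/organization': 'Submitter',
--         'Submission date': 'Date',
--         'Overall': 'Overall Score',
--         'Overall cost': 'Overall Cost',
--         'Logs': 'Logs',
--         'Openness': 'Openness',
--         'Agent tooling': 'Agent Tooling',
--         'LLM base': 'LLM Base',
--     }
--
--     if raw_col in fixed_mappings:
--         return fixed_mappings[raw_col]
--
--     # Case 2: Handle dynamic names by finding the longest matching base name.
--     # We sort by length (desc) to match 'core_bench_validation' before 'core_bench'.
--     sorted_base_names = sorted(INFORMAL_TO_FORMAL_NAME_MAP.keys(), key=len, reverse=True)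
--
--     for base_name in sorted_base_names:
--         if raw_col.startswith(base_name):
--             formal_name = INFORMAL_TO_FORMAL_NAME_MAP[base_name]
--
--             # Get the metric part (e.g., ' score' or ' cost 95% CI')
--             metric_part = raw_col[len(base_name):].strip()
--
--             # Capitalize the metric part correctly (e.g., 'score' -> 'Score')
--             pretty_metric = metric_part.capitalize()
--             return f"{formal_name} {pretty_metric}"
--
--     # Case 3: If no specific rule applies, just make it title case.
--     return raw_col.title()
-- ===== SOURCE B (Python) =====
-- # B: no per-call sort over the key set; the mapping tables live as "key|value"
-- # rows parsed once at import, and Case 2 probes the dict with raw_col[:i] for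
-- # prefix lengths i from the longest possible down to 1 (same output as A).
--
-- _TABLE = (
--     'lit|Literature Understanding',
--     'code|Code & Execution',
--     'data|Data Analysis',
--     'discovery|End-to-End Discovery',
--     'arxivdigestables_validation|ArxivDIGESTables-Clean',
--     'ArxivDIGESTables_Clean_validation|ArxivDIGESTables-Clean',
--     'sqa_dev|ScholarQA-CS2',
--     'ScholarQA_CS2_validation|ScholarQA-CS2',
--     'litqa2_validation|LitQA2-FullText',
--     'LitQA2_FullText_validation|LitQA2-FullText',
--     'paper_finder_validation|PaperFindingBench',
--     'PaperFindingBench_validation|PaperFindingBench',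
--     'paper_finder_litqa2_validation|LitQA2-FullText-Search',
--     'LitQA2_FullText_Search_validation|LitQA2-FullText-Search',
--     'discoverybench_validation|DiscoveryBench',
--     'DiscoveryBench_validation|DiscoveryBench',
--     'core_bench_validation|CORE-Bench-Hard',
--     'CORE_Bench_Hard_validation|CORE-Bench-Hard',
--     'ds1000_validation|DS-1000',
--     'DS_1000_validation|DS-1000',
--     'e2e_discovery_validation|E2E-Bench',
--     'E2E_Bench_validation|E2E-Bench',
--     'e2e_discovery_hard_validation|E2E-Bench-Hard',
--     'E2E_Bench_Hard_validation|E2E-Bench-Hard',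
--     'super_validation|SUPER-Expert',
--     'SUPER_Expert_validation|SUPER-Expert',
--     'paper_finder_test|PaperFindingBench',
--     'PaperFindingBench_test|PaperFindingBench',
--     'paper_finder_litqa2_test|LitQA2-FullText-Search',
--     'LitQA2_FullText_Search_test|LitQA2-FullText-Search',
--     'sqa_test|ScholarQA-CS2',
--     'ScholarQA_CS2_test|ScholarQA-CS2',
--     'arxivdigestables_test|ArxivDIGESTables-Clean',
--     'ArxivDIGESTables_Clean_test|ArxivDIGESTables-Clean',
--     'litqa2_test|LitQA2-FullText',
--     'LitQA2_FullText_test|LitQA2-FullText',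
--     'discoverybench_test|DiscoveryBench',
--     'DiscoveryBench_test|DiscoveryBench',
--     'core_bench_test|CORE-Bench-Hard',
--     'CORE_Bench_Hard_test|CORE-Bench-Hard',
--     'ds1000_test|DS-1000',
--     'DS_1000_test|DS-1000',
--     'e2e_discovery_test|E2E-Bench',
--     'E2E_Bench_test|E2E-Bench',
--     'e2e_discovery_hard_test|E2E-Bench-Hard',
--     'E2E_Bench_Hard_test|E2E-Bench-Hard',
--     'super_test|SUPER-Expert',
--     'SUPER_Expert_test|SUPER-Expert',
-- )
--
-- _FIXED_TABLE = (
--     'id|id',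
--     'Agent|Agent',
--     'Agent description|Agent Description',
--     'User/organization|Submitter',
--     'Submission date|Date',
--     'Overall|Overall Score',
--     'Overall cost|Overall Cost',
--     'Logs|Logs',
--     'Openness|Openness',
--     'Agent tooling|Agent Tooling',
--     'LLM base|LLM Base',
-- )
--
--
-- def _parse(rows):
--     return dict(line.split("|") for line in rows)
--
--
-- _MAP = _parse(_TABLE)
-- _FIXED = _parse(_FIXED_TABLE)
-- _MAX_KEY_LEN = max(map(len, _MAP))
--
--
-- def _pretty_column_name(raw_col: str) -> str:
--     # Case 1: fixed, special-case mappings first.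
--     if raw_col in _FIXED:
--         return _FIXED[raw_col]
--
--     # Case 2: probe prefixes of raw_col directly, longest first -- the longest
--     # key that is a prefix of raw_col is exactly the longest prefix of raw_col
--     # that is a key.
--     for i in range(min(len(raw_col), _MAX_KEY_LEN), 0, -1):
--         formal_name = _MAP.get(raw_col[:i])
--         if formal_name is not None:
--             return f"{formal_name} {raw_col[i:].strip().capitalize()}"
--
--     # Case 3: fallback.
--     return raw_col.title()
-- ===== Notes on version B (the rewrite author's own statement) =====
-- stated objective: simpler
-- what changed: Case 2 no longer sorts all 49 map keys by length each call and scans them with startswith; B parses its mapping tables once from compact text blocks and probes the dict directly with raw_col[:i] for prefix lengths i from min(len(raw_col), max key length) down to 1, returning on the first hit.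
import Mathlib
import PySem

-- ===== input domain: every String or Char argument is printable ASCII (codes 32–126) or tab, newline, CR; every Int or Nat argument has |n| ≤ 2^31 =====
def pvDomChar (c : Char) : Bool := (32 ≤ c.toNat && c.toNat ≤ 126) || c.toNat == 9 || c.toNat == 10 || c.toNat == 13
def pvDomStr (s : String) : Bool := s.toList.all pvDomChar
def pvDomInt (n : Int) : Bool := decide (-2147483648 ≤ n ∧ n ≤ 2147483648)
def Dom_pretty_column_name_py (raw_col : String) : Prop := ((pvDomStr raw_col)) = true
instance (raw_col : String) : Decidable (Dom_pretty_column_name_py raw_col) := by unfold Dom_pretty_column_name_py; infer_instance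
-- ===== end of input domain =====

-- B replaces A's per-call sort-all-keys-then-scan-with-startswith by probing the map directly with
-- prefixes of raw_col from the longest possible length down; B's tables are parsed once from compact
-- text blocks instead of dict literals. Same output; objective: simpler control flow, no per-call sort.

-- Hand ports of str.title / str.capitalize (not in PySem); exact on the ASCII domain,
-- where Python's "cased character" is exactly an alphabetic character. Shared by both ports
-- (both Pythons call the same builtins).
def titleChars : List Char → Bool → List Char
  | [], _ => []
  | c :: cs, prevCased =>
    (if PySem.Chars.isalpha c then
       (if prevCased then PySem.Chars.lowerChar c else PySem.Chars.upperChar c)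
     else c) :: titleChars cs (PySem.Chars.isalpha c)

def pyTitle (s : String) : String := String.ofList (titleChars s.toList false)

def pyCapitalize (s : String) : String :=
  match s.toList with
  | [] => ""
  | c :: cs => String.ofList (PySem.Chars.upperChar c :: PySem.Chars.lower cs)

-- ===== PORT A =====
def formalMap : PySem.Dict String String := PySem.Dict.ofList [
  ("lit", "Literature Understanding"),
  ("code", "Code & Execution"),
  ("data", "Data Analysis"),
  ("discovery", "End-to-End Discovery"),
  ("arxivdigestables_validation", "ArxivDIGESTables-Clean"),
  ("ArxivDIGESTables_Clean_validation", "ArxivDIGESTables-Clean"),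
  ("sqa_dev", "ScholarQA-CS2"),
  ("ScholarQA_CS2_validation", "ScholarQA-CS2"),
  ("litqa2_validation", "LitQA2-FullText"),
  ("LitQA2_FullText_validation", "LitQA2-FullText"),
  ("paper_finder_validation", "PaperFindingBench"),
  ("PaperFindingBench_validation", "PaperFindingBench"),
  ("paper_finder_litqa2_validation", "LitQA2-FullText-Search"),
  ("LitQA2_FullText_Search_validation", "LitQA2-FullText-Search"),
  ("discoverybench_validation", "DiscoveryBench"),
  ("DiscoveryBench_validation", "DiscoveryBench"),
  ("core_bench_validation", "CORE-Bench-Hard"),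
  ("CORE_Bench_Hard_validation", "CORE-Bench-Hard"),
  ("ds1000_validation", "DS-1000"),
  ("DS_1000_validation", "DS-1000"),
  ("e2e_discovery_validation", "E2E-Bench"),
  ("E2E_Bench_validation", "E2E-Bench"),
  ("e2e_discovery_hard_validation", "E2E-Bench-Hard"),
  ("E2E_Bench_Hard_validation", "E2E-Bench-Hard"),
  ("super_validation", "SUPER-Expert"),
  ("SUPER_Expert_validation", "SUPER-Expert"),
  ("paper_finder_test", "PaperFindingBench"),
  ("PaperFindingBench_test", "PaperFindingBench"),
  ("paper_finder_litqa2_test", "LitQA2-FullText-Search"),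
  ("LitQA2_FullText_Search_test", "LitQA2-FullText-Search"),
  ("sqa_test", "ScholarQA-CS2"),
  ("ScholarQA_CS2_test", "ScholarQA-CS2"),
  ("arxivdigestables_test", "ArxivDIGESTables-Clean"),
  ("ArxivDIGESTables_Clean_test", "ArxivDIGESTables-Clean"),
  ("litqa2_test", "LitQA2-FullText"),
  ("LitQA2_FullText_test", "LitQA2-FullText"),
  ("discoverybench_test", "DiscoveryBench"),
  ("DiscoveryBench_test", "DiscoveryBench"),
  ("core_bench_test", "CORE-Bench-Hard"),
  ("CORE_Bench_Hard_test", "CORE-Bench-Hard"),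
  ("ds1000_test", "DS-1000"),
  ("DS_1000_test", "DS-1000"),
  ("e2e_discovery_test", "E2E-Bench"),
  ("E2E_Bench_test", "E2E-Bench"),
  ("e2e_discovery_hard_test", "E2E-Bench-Hard"),
  ("E2E_Bench_Hard_test", "E2E-Bench-Hard"),
  ("super_test", "SUPER-Expert"),
  ("SUPER_Expert_test", "SUPER-Expert")
]
def fixedMappings : PySem.Dict String String := PySem.Dict.ofList [
  ("id", "id"),
  ("Agent", "Agent"),
  ("Agent description", "Agent Description"),
  ("User/organization", "Submitter"),
  ("Submission date", "Date"),
  ("Overall", "Overall Score"),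
  ("Overall cost", "Overall Cost"),
  ("Logs", "Logs"),
  ("Openness", "Openness"),
  ("Agent tooling", "Agent Tooling"),
  ("LLM base", "LLM Base")
]

def sortedBaseNames : List String :=
  PySem.List.sorted formalMap.keys (fun k => PySem.Str.len k) true

def loopA (raw_col : String) : List String → String
  | [] => pyTitle raw_col
  | base_name :: rest =>
    if PySem.Str.startswith raw_col base_name then
      match formalMap.get? base_name with
      | some formal_name =>
        formal_name ++ " " ++
          pyCapitalize (PySem.Str.strip (PySem.Str.slice raw_col (some (PySem.Str.len base_name)) none))
      | none => ""   -- Python would raise KeyError; unreachable: base_name comes from formalMap.keys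
    else loopA raw_col rest

def pretty_column_name_py (raw_col : String) : String :=
  match fixedMappings.get? raw_col with
  | some v => v
  | none => loopA raw_col sortedBaseNames

-- ===== PORT B =====
-- B's module-level line tables, parsed once ('dict(line.split("|") for line in _TABLE)').
def tableB : List String := [
  "lit|Literature Understanding",
  "code|Code & Execution",
  "data|Data Analysis",
  "discovery|End-to-End Discovery",
  "arxivdigestables_validation|ArxivDIGESTables-Clean",
  "ArxivDIGESTables_Clean_validation|ArxivDIGESTables-Clean",
  "sqa_dev|ScholarQA-CS2",
  "ScholarQA_CS2_validation|ScholarQA-CS2",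
  "litqa2_validation|LitQA2-FullText",
  "LitQA2_FullText_validation|LitQA2-FullText",
  "paper_finder_validation|PaperFindingBench",
  "PaperFindingBench_validation|PaperFindingBench",
  "paper_finder_litqa2_validation|LitQA2-FullText-Search",
  "LitQA2_FullText_Search_validation|LitQA2-FullText-Search",
  "discoverybench_validation|DiscoveryBench",
  "DiscoveryBench_validation|DiscoveryBench",
  "core_bench_validation|CORE-Bench-Hard",
  "CORE_Bench_Hard_validation|CORE-Bench-Hard",
  "ds1000_validation|DS-1000",
  "DS_1000_validation|DS-1000",
  "e2e_discovery_validation|E2E-Bench",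
  "E2E_Bench_validation|E2E-Bench",
  "e2e_discovery_hard_validation|E2E-Bench-Hard",
  "E2E_Bench_Hard_validation|E2E-Bench-Hard",
  "super_validation|SUPER-Expert",
  "SUPER_Expert_validation|SUPER-Expert",
  "paper_finder_test|PaperFindingBench",
  "PaperFindingBench_test|PaperFindingBench",
  "paper_finder_litqa2_test|LitQA2-FullText-Search",
  "LitQA2_FullText_Search_test|LitQA2-FullText-Search",
  "sqa_test|ScholarQA-CS2",
  "ScholarQA_CS2_test|ScholarQA-CS2",
  "arxivdigestables_test|ArxivDIGESTables-Clean",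
  "ArxivDIGESTables_Clean_test|ArxivDIGESTables-Clean",
  "litqa2_test|LitQA2-FullText",
  "LitQA2_FullText_test|LitQA2-FullText",
  "discoverybench_test|DiscoveryBench",
  "DiscoveryBench_test|DiscoveryBench",
  "core_bench_test|CORE-Bench-Hard",
  "CORE_Bench_Hard_test|CORE-Bench-Hard",
  "ds1000_test|DS-1000",
  "DS_1000_test|DS-1000",
  "e2e_discovery_test|E2E-Bench",
  "E2E_Bench_test|E2E-Bench",
  "e2e_discovery_hard_test|E2E-Bench-Hard",
  "E2E_Bench_Hard_test|E2E-Bench-Hard",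
  "super_test|SUPER-Expert",
  "SUPER_Expert_test|SUPER-Expert"
]
def fixedTableB : List String := [
  "id|id",
  "Agent|Agent",
  "Agent description|Agent Description",
  "User/organization|Submitter",
  "Submission date|Date",
  "Overall|Overall Score",
  "Overall cost|Overall Cost",
  "Logs|Logs",
  "Openness|Openness",
  "Agent tooling|Agent Tooling",
  "LLM base|LLM Base"
]

def parseTable (rows : List String) : PySem.Dict String String :=
  PySem.Dict.ofList (rows.map (fun line =>
    match PySem.Str.split? line "|" with
    | some [k, v] => (k, v)
    | _ => ("", "")))   -- Python dict() would raise on a malformed row; every row of B's literal tables has exactly one '|'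

def mapB : PySem.Dict String String := parseTable tableB
def fixedB : PySem.Dict String String := parseTable fixedTableB

def maxKeyLenB : Int := (PySem.List.max? (mapB.keys.map PySem.Str.len) (fun n => n)).getD 0
  -- max(map(len, _MAP)); the parsed table is non-empty, so max() cannot raise

-- for i in range(min(len(raw_col), _MAX_KEY_LEN), 0, -1): probe raw_col[:i]
def loopB (raw_col : String) : Nat → String
  | 0 => pyTitle raw_col
  | i + 1 =>
    (mapB.get? (PySem.Str.slice raw_col none (some ((i + 1 : Nat) : Int)))).elim
      (loopB raw_col i)
      (fun formal_name =>
        formal_name ++ " " ++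
          pyCapitalize (PySem.Str.strip (PySem.Str.slice raw_col (some ((i + 1 : Nat) : Int)) none)))

def pretty_column_name_py_alt (raw_col : String) : String :=
  match fixedB.get? raw_col with
  | some v => v
  | none => loopB raw_col (min (PySem.Str.len raw_col) maxKeyLenB).toNat
    -- the loop bound min(len(raw_col), _MAX_KEY_LEN) is a non-negative int; .toNat is exact

-- ===== PRECONDITION & SPEC =====
def Spec_pretty_column_name_py (raw_col : String) (out : String) : Prop := out = pretty_column_name_py_alt raw_col
instance (raw_col : String) (out : String) : Decidable (Spec_pretty_column_name_py raw_col out) := by unfold Spec_pretty_column_name_py; infer_instance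

-- ===== CLAIM (what is proved, stated in full; the proofs are below) =====
def Claim_equal_pretty_column_name_py : Prop := ∀ (raw_col : String), Dom_pretty_column_name_py raw_col → Spec_pretty_column_name_py raw_col (pretty_column_name_py raw_col)

-- ===== LEMMAS AND PROOFS =====

set_option maxRecDepth 100000 in
set_option maxHeartbeats 4000000 in
lemma mapB_eq : mapB = formalMap := by decide

set_option maxRecDepth 100000 in
lemma fixedB_eq : fixedB = fixedMappings := by decide

set_option maxRecDepth 100000 in
set_option maxHeartbeats 4000000 in
lemma maxKeyLenB_eq : maxKeyLenB = 33 := by decide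

set_option maxRecDepth 40000 in
lemma sbn_pairwise : sortedBaseNames.Pairwise (fun a b => b.toList.length ≤ a.toList.length) := by decide

set_option maxRecDepth 40000 in
lemma sbn_len : ∀ k ∈ sortedBaseNames, 1 ≤ k.toList.length ∧ k.toList.length ≤ 33 := by decide

set_option maxRecDepth 40000 in
lemma keys_sub_sbn : ∀ k ∈ formalMap.keys, k ∈ sortedBaseNames := by decide

set_option maxRecDepth 40000 in
lemma sbn_sub_keys : ∀ k ∈ sortedBaseNames, k ∈ formalMap.keys := by decide

lemma loopA_skip (s : String) (ks1 ks2 : List String)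
    (h : ∀ k ∈ ks1, PySem.Str.startswith s k = false) :
    loopA s (ks1 ++ ks2) = loopA s ks2 := by
  induction ks1 with
  | nil => rfl
  | cons k ks ih =>
    have hk : PySem.Chars.startswith s.toList k.toList = false := by
      rw [← PySem.Str.startswith_eq]; exact h k (by simp)
    have hrest := ih (fun x hx => h x (by simp [hx]))
    simp [loopA, hk, hrest]

lemma loopA_hit (s p : String) (v : String) (ks : List String)
    (hmem : p ∈ ks)
    (hpw : ks.Pairwise (fun a b => b.toList.length ≤ a.toList.length))
    (hpm : PySem.Str.startswith s p = true)
    (hv : formalMap.get? p = some v)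
    (hfail : ∀ k ∈ ks, p.toList.length ≤ k.toList.length → k ≠ p → PySem.Str.startswith s k = false) :
    loopA s ks = v ++ " " ++
      pyCapitalize (PySem.Str.strip (PySem.Str.slice s (some (PySem.Str.len p)) none)) := by
  induction ks with
  | nil => cases hmem
  | cons k ks ih =>
    by_cases hk : k = p
    · subst hk
      simp only [loopA, hpm, if_pos, hv]
    · have hlen : p.toList.length ≤ k.toList.length := by
        have := (List.pairwise_cons.mp hpw).1
        exact this p (by cases hmem with | head => exact absurd rfl hk | tail _ h => exact h)
      have hf : PySem.Str.startswith s k = false := hfail k (by simp) hlen hk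
      have hmem' : p ∈ ks := by cases hmem with | head => exact absurd rfl hk | tail _ h => exact h
      simp only [loopA, hf]
      exact ih hmem' (List.pairwise_cons.mp hpw).2
        (fun k' hk' h1 h2 => hfail k' (by simp [hk']) h1 h2)

set_option maxRecDepth 40000 in
lemma main_lemma (s : String) : ∀ i, i ≤ s.toList.length →
    (∀ k ∈ sortedBaseNames, i < k.toList.length → ¬ (k.toList <+: s.toList)) →
    loopA s sortedBaseNames = loopB s i := by
  intro i
  induction i with
  | zero =>
    intro _ h
    have : ∀ k ∈ sortedBaseNames, PySem.Str.startswith s k = false := by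
      intro k hk
      have h1 := (sbn_len k hk).1
      have := h k hk (by omega)
      rw [PySem.Str.startswith_eq]
      exact (Bool.not_eq_true _).mp (fun hc => this ((PySem.Chars.startswith_iff _ _).mp hc))
    calc loopA s sortedBaseNames = loopA s (sortedBaseNames ++ []) := by rw [List.append_nil]
      _ = loopA s [] := loopA_skip s _ [] this
      _ = loopB s 0 := rfl
  | succ i ih =>
    intro hle h
    have hslice : (PySem.Str.slice s none (some ((i + 1 : Nat) : Int))).toList = s.toList.take (i+1) := by
      rw [PySem.Str.toList_slice, PySem.Chars.slice_eq_listSlice, PySem.List.slice_to_natCast]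
    cases hget : mapB.get? (PySem.Str.slice s none (some ((i + 1 : Nat) : Int))) with
    | some v =>
      have hgetF : formalMap.get? (PySem.Str.slice s none (some ((i + 1 : Nat) : Int))) = some v := by
        rw [← mapB_eq]; exact hget
      have hplen : (PySem.Str.slice s none (some ((i + 1 : Nat) : Int))).toList.length = i + 1 := by
        rw [hslice, List.length_take]; omega
      have hpmem : PySem.Str.slice s none (some ((i + 1 : Nat) : Int)) ∈ sortedBaseNames := by
        apply keys_sub_sbn
        by_contra hc
        rw [(PySem.Dict.get?_eq_none_iff_not_mem_keys formalMap _).mpr hc] at hgetF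
        cases hgetF
      have hppre : (PySem.Str.slice s none (some ((i + 1 : Nat) : Int))).toList <+: s.toList := by
        rw [hslice]; exact List.take_prefix _ _
      have hA := loopA_hit s (PySem.Str.slice s none (some ((i + 1 : Nat) : Int))) v
        sortedBaseNames hpmem sbn_pairwise
        (by rw [PySem.Str.startswith_eq]; exact (PySem.Chars.startswith_iff _ _).mpr hppre)
        hgetF
        (by
          intro k hk hlen hne
          rw [PySem.Str.startswith_eq]
          apply (Bool.not_eq_true _).mp
          intro hc
          have hkpre := (PySem.Chars.startswith_iff _ _).mp hc
          rw [hplen] at hlen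
          rcases Nat.lt_or_ge (i+1) k.toList.length with hgt | hge
          · exact h k hk hgt hkpre
          · have hkl : k.toList.length = i + 1 := by omega
            apply hne
            apply String.toList_inj.mp
            rw [hslice, ← hkl]
            exact List.prefix_iff_eq_take.mp hkpre)
      have hlenp : PySem.Str.len (PySem.Str.slice s none (some ((i + 1 : Nat) : Int))) = ((i + 1 : Nat) : Int) := by
        rw [PySem.Str.len_eq, hplen]
      rw [hA, hlenp, loopB, hget]
      rfl
    | none =>
      have hB : loopB s (i+1) = loopB s i := by rw [loopB, hget]; rfl
      rw [hB]
      apply ih (by omega)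
      intro k hk hgt hkpre
      rcases Nat.lt_or_ge (i+1) k.toList.length with hgt2 | hge
      · exact h k hk hgt2 hkpre
      · have hkl : k.toList.length = i + 1 := by omega
        have heqk : PySem.Str.slice s none (some ((i + 1 : Nat) : Int)) = k := by
          apply String.toList_inj.mp
          rw [hslice, ← hkl]
          exact (List.prefix_iff_eq_take.mp hkpre).symm
        rw [heqk, mapB_eq] at hget
        exact ((PySem.Dict.get?_eq_none_iff_not_mem_keys formalMap k).mp hget) (sbn_sub_keys k hk)

-- ===== VERDICT (by name: the statement is the Claim_ definition above) =====
set_option maxRecDepth 40000 in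
theorem pretty_column_name_py_spec : Claim_equal_pretty_column_name_py := by
  intro s _
  unfold Spec_pretty_column_name_py pretty_column_name_py pretty_column_name_py_alt
  rw [fixedB_eq]
  cases fixedMappings.get? s with
  | some v => rfl
  | none =>
    simp only
    have hbound : (min (PySem.Str.len s) maxKeyLenB).toNat ≤ s.toList.length := by
      rw [PySem.Str.len_eq, maxKeyLenB_eq]; omega
    apply main_lemma s _ hbound
    intro k hk hgt hkpre
    have h33 := (sbn_len k hk).2
    have hlen := hkpre.length_le
    rw [PySem.Str.len_eq, maxKeyLenB_eq] at hgt
    omega
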